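-- pv_equiv track=rewrite | github.com/Dormailler/Algorithm | 프로그래머스/unrated/181931. 등차수열의 특정한 항만 더하기/등차수열의 특정한 항만 더하기.py | solution
-- ===== SOURCE A (Python) =====
-- def solution(a, d, included):
--     n = a
--     answer = 0
--     for i in range(len(included)):
--         if included[i]:
--             answer += n
--         n += d
--     return answer
-- ===== SOURCE B (Python) =====
-- def solution(a, d, included):
--     # Scan back-to-front: s holds the sum of the selected terms of the suffix
--     # pretending the current position is the first term (value a); moving one
--     # position left shifts every selected suffix term up by d.
--     s = 0
--     c = 0
--     for inc in reversed(included):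
--         s += d * c
--         if inc:
--             s += a
--             c += 1
--     return s
-- ===== Notes on version B (the rewrite author's own statement) =====
-- stated objective: alternative
-- what changed: Scans included back-to-front with no running term and no indices: it keeps the suffix sum normalised to start value a plus a count of selected suffix terms, and re-bases the whole suffix by d*count at each leftward step.
import Mathlib
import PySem

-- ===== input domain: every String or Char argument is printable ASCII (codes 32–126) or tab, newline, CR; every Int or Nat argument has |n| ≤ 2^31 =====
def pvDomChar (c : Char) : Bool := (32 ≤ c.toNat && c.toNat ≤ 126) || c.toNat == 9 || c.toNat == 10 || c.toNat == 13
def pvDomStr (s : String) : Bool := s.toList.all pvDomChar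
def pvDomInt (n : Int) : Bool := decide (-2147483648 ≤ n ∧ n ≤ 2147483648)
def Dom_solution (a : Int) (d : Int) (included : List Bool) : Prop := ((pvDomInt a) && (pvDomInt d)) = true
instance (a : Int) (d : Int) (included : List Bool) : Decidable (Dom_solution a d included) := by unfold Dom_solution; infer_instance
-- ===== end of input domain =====

-- B scans included back-to-front, re-basing a suffix sum by d*count at each step instead of A's forward running-term accumulator; objective: alternative decomposition.


-- ===== PORT A =====
-- A's loop: add the current term n to answer when included, then advance n by d.
def pvALoop (d : Int) : Int → Int → List Bool → Int
  | _, answer, [] => answer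
  | n, answer, b :: t => pvALoop d (n + d) (if b then answer + n else answer) t

def solution (a : Int) (d : Int) (included : List Bool) : Int :=
  pvALoop d a 0 included

-- ===== PORT B =====
-- B's loop body over the reversed list: shift the suffix sum by d*c, then take the head term (value a) if selected.
def pvBStep (a : Int) (d : Int) (st : Int × Int) (inc : Bool) : Int × Int :=
  if inc then (st.1 + d * st.2 + a, st.2 + 1) else (st.1 + d * st.2, st.2)

def solution_alt (a : Int) (d : Int) (included : List Bool) : Int :=
  (included.reverse.foldl (pvBStep a d) (0, 0)).1

-- ===== PRECONDITION & SPEC =====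
def Spec_solution (a : Int) (d : Int) (included : List Bool) (out : Int) : Prop := out = solution_alt a d included
instance (a : Int) (d : Int) (included : List Bool) (out : Int) : Decidable (Spec_solution a d included out) := by unfold Spec_solution; infer_instance

-- ===== CLAIM (what is proved, stated in full; the proofs are below) =====
def Claim_equal_solution : Prop := ∀ (a : Int) (d : Int) (included : List Bool), Dom_solution a d included → Spec_solution a d included (solution a d included)

-- ===== LEMMAS AND PROOFS =====
-- Reference sum (selected terms with start a, step d) and count of selected entries.
def pvS (a d : Int) : List Bool → Int
  | [] => 0
  | b :: t => (if b then a else 0) + pvS (a + d) d t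

def pvC : List Bool → Int
  | [] => 0
  | b :: t => (if b then 1 else 0) + pvC t

lemma pvALoop_eq (d : Int) (l : List Bool) : ∀ (n ans : Int), pvALoop d n ans l = ans + pvS n d l := by
  induction l with
  | nil => intro n ans; simp [pvALoop, pvS]
  | cons b t ih =>
    intro n ans
    cases b <;> simp [pvALoop, pvS, ih] <;> ring

lemma pvS_shift (d : Int) (l : List Bool) : ∀ (a : Int), pvS (a + d) d l = pvS a d l + d * pvC l := by
  induction l with
  | nil => intro a; simp [pvS, pvC]
  | cons b t ih =>
    intro a
    cases b <;> simp [pvS, pvC, ih] <;> ring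

lemma pvB_foldr (a d : Int) (l : List Bool) :
    l.foldr (fun inc st => pvBStep a d st inc) (0, 0) = (pvS a d l, pvC l) := by
  induction l with
  | nil => simp [pvS, pvC]
  | cons b t ih =>
    simp only [List.foldr_cons, ih]
    cases b
    · simp only [pvBStep, pvS, pvC, Bool.false_eq_true, if_false]
      rw [pvS_shift]
      rw [Prod.mk.injEq]
      constructor <;> ring
    · simp only [pvBStep, pvS, pvC, if_true]
      rw [pvS_shift]
      rw [Prod.mk.injEq]
      constructor <;> ring

-- ===== VERDICT (by name: the statement is the Claim_ definition above) =====
theorem solution_spec : Claim_equal_solution := by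
  intro a d included _
  unfold Spec_solution solution solution_alt
  rw [List.foldl_reverse, pvALoop_eq, pvB_foldr]
  simp
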